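-- pv_equiv track=rewrite | github.com/BlueBrain/dir-content-diff | docs/source/conf.py | convert_github_admonitions
-- ===== SOURCE A (Python) =====
-- def convert_github_admonitions(text):
--     """Convert GitHub-style admonitions to MyST format."""
--     lines = text.split("\n")
--     github_to_myst = {
--         "> [!NOTE]": ":::{note}",
--         "> [!TIP]": ":::{tip}",
--         "> [!IMPORTANT]": ":::{important}",
--         "> [!WARNING]": ":::{warning}",
--         "> [!CAUTION]": ":::{caution}",
--     }
--
--     converted_lines = []
--     in_admonition = False
--
--     for line in lines:
--         # Check if this line starts a GitHub admonition
--         admonition_found = False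
--         for github_style, myst_style in github_to_myst.items():
--             if line.strip().startswith(github_style):
--                 # Start of admonition
--                 converted_lines.append(myst_style)
--                 in_admonition = True
--                 admonition_found = True
--                 break
--
--         if not admonition_found:
--             if in_admonition:
--                 strip_line = line.strip()
--                 if strip_line.startswith("> "):
--                     # Content of admonition - remove the "> " prefix
--                     content = strip_line[2:]
--                     converted_lines.append(content)
--                 elif strip_line == ">":
--                     # Empty line in admonition
--                     converted_lines.append("")
--                 elif strip_line == "":
--                     # Empty line - could be end of admonition or just spacing
--                     converted_lines.append("")
--                 else:
--                     # End of admonition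
--                     converted_lines.append(":::")
--                     converted_lines.append("")
--                     converted_lines.append(line)
--                     in_admonition = False
--             else:
--                 # Regular line
--                 converted_lines.append(line)
--
--     # Close any remaining open admonition
--     if in_admonition:
--         converted_lines.append(":::")
--
--     return "\n".join(converted_lines)
-- ===== SOURCE B (Python) =====
-- GITHUB_TO_MYST = {
--     "> [!NOTE]": ":::{note}",
--     "> [!TIP]": ":::{tip}",
--     "> [!IMPORTANT]": ":::{important}",
--     "> [!WARNING]": ":::{warning}",
--     "> [!CAUTION]": ":::{caution}",
-- }
--
--
-- def _header_of(line):
--     """Return the MyST header if the stripped line starts a GitHub admonition."""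
--     stripped = line.strip()
--     for github_style, myst_style in GITHUB_TO_MYST.items():
--         if stripped.startswith(github_style):
--             return myst_style
--     return None
--
--
-- def convert_github_admonitions(text):
--     """Convert GitHub-style admonitions to MyST format."""
--     lines = text.split("\n")
--     n = len(lines)
--     out = []
--     i = 0
--     while i < n:
--         line = lines[i]
--         i += 1
--         header = _header_of(line)
--         if header is None:
--             out.append(line)
--             continue
--         out.append(header)
--         # Consume the admonition body with an inner loop.
--         while i < n:
--             cur = lines[i]
--             i += 1
--             inner_header = _header_of(cur)
--             if inner_header is not None:
--                 out.append(inner_header)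
--                 continue
--             stripped = cur.strip()
--             if stripped.startswith("> "):
--                 out.append(stripped[2:])
--             elif stripped == ">" or stripped == "":
--                 out.append("")
--             else:
--                 out.append(":::")
--                 out.append("")
--                 out.append(cur)
--                 break
--         else:
--             out.append(":::")
--     return "\n".join(out)
-- ===== Notes on version B (the rewrite author's own statement) =====
-- stated objective: alternative
-- what changed: Replaces A's single pass with an in_admonition boolean flag by a nested-loop decomposition: an outer scan over lines and an inner consume-loop that processes an admonition body until a closing line (with a while-else appending the final ':::').
import Mathlib
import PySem

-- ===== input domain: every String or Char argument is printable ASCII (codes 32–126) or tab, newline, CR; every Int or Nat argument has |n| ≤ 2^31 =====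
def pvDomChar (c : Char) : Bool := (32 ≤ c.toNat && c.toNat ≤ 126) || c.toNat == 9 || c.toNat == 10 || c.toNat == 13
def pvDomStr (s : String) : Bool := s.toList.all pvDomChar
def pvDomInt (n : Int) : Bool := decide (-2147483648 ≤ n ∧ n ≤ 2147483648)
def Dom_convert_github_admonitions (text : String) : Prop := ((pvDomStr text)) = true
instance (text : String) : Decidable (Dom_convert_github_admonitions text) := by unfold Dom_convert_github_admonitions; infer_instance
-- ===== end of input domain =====

-- B replaces A's boolean in_admonition flag by a nested consume-loop decomposition (outer scan / inner admonition-body loop); objective: alternative structure, same cost.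

-- ===== PORT A =====
-- the dict github_to_myst, in insertion order
def pvPairsA : List (String × String) :=
  [("> [!NOTE]", ":::{note}"), ("> [!TIP]", ":::{tip}"), ("> [!IMPORTANT]", ":::{important}"),
   ("> [!WARNING]", ":::{warning}"), ("> [!CAUTION]", ":::{caution}")]

-- A's inner for-loop with break: first pair whose key prefixes line.strip()
def pvFindA (line : String) : Option String :=
  pvPairsA.findSome? (fun p =>
    if PySem.Str.startswith (PySem.Str.strip line) p.1 then some p.2 else none)

-- one iteration of A's for-loop: state = (converted_lines, in_admonition)
def pvStepA (st : List String × Bool) (line : String) : List String × Bool :=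
  match pvFindA line with
  | some myst => (st.1 ++ [myst], true)
  | none =>
    if st.2 then
      let sl := PySem.Str.strip line
      if PySem.Str.startswith sl "> " then
        (st.1 ++ [PySem.Str.slice sl (some 2) none], true)
      else if sl = ">" then (st.1 ++ [""], true)
      else if sl = "" then (st.1 ++ [""], true)
      else (st.1 ++ [":::", "", line], false)
    else (st.1 ++ [line], false)

def convert_github_admonitions (text : String) : String :=
  let lines := (PySem.Str.split? text "\n").getD []
  let st := lines.foldl pvStepA ([], false)
  PySem.Str.join "\n" (if st.2 then st.1 ++ [":::"] else st.1)

-- ===== PORT B =====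
def pvHeaderB (line : String) : Option String :=
  [("> [!NOTE]", ":::{note}"), ("> [!TIP]", ":::{tip}"), ("> [!IMPORTANT]", ":::{important}"),
   ("> [!WARNING]", ":::{warning}"), ("> [!CAUTION]", ":::{caution}")].findSome? (fun p =>
    if PySem.Str.startswith (PySem.Str.strip line) p.1 then some p.2 else none)

mutual
-- Source B's outer while loop over the remaining lines
def pvOuterB : List String → List String
  | [] => []
  | l :: rest =>
    match pvHeaderB l with
    | some h => h :: pvInnerB rest
    | none => l :: pvOuterB rest
-- Source B's inner consume-loop over the admonition body (while-else: [":::"] when lines run out)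
def pvInnerB : List String → List String
  | [] => [":::"]
  | l :: rest =>
    match pvHeaderB l with
    | some h => h :: pvInnerB rest
    | none =>
      let s := PySem.Str.strip l
      if PySem.Str.startswith s "> " then PySem.Str.slice s (some 2) none :: pvInnerB rest
      else if s = ">" ∨ s = "" then "" :: pvInnerB rest
      else ":::" :: "" :: l :: pvOuterB rest
end

def convert_github_admonitions_alt (text : String) : String :=
  PySem.Str.join "\n" (pvOuterB ((PySem.Str.split? text "\n").getD []))

-- ===== PRECONDITION & SPEC =====
def Spec_convert_github_admonitions (text : String) (out : String) : Prop := out = convert_github_admonitions_alt text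
instance (text : String) (out : String) : Decidable (Spec_convert_github_admonitions text out) := by unfold Spec_convert_github_admonitions; infer_instance

-- ===== CLAIM (what is proved, stated in full; the proofs are below) =====
def Claim_equal_convert_github_admonitions : Prop := ∀ (text : String), Dom_convert_github_admonitions text → Spec_convert_github_admonitions text (convert_github_admonitions text)

-- ===== LEMMAS AND PROOFS =====

lemma pvFindA_eq_headerB (l : String) : pvFindA l = pvHeaderB l := rfl

-- bisimulation: A's flag-driven fold (plus its final close) equals B's mutual recursion
lemma pvMain (lines : List String) : ∀ (acc : List String) (flag : Bool),
    (let st := lines.foldl pvStepA (acc, flag)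
     if st.2 then st.1 ++ [":::"] else st.1)
      = acc ++ (if flag then pvInnerB lines else pvOuterB lines) := by
  induction lines with
  | nil => intro acc flag; cases flag <;> simp [pvOuterB, pvInnerB]
  | cons l rest ih =>
    intro acc flag
    cases h : pvHeaderB l with
    | some hd =>
      cases flag <;>
        simp [pvOuterB, pvInnerB, pvStepA, pvFindA_eq_headerB, h, ih]
    | none =>
      cases flag with
      | false =>
        simp [pvOuterB, pvStepA, pvFindA_eq_headerB, h, ih]
      | true =>
        have e1 : PySem.Chars.startswith ['>'] ['>', ' '] = false := by decide
        have e2 : PySem.Chars.startswith ([] : List Char) ['>', ' '] = false := by decide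
        by_cases h1 : PySem.Chars.startswith (PySem.Chars.strip l.toList) ['>', ' '] = true
        · simp [pvInnerB, pvStepA, pvFindA_eq_headerB, h, h1, ih]
        · by_cases h2 : PySem.Str.strip l = ">"
          · simp [pvInnerB, pvStepA, pvFindA_eq_headerB, h, h2, e1, ih]
          · by_cases h3 : PySem.Str.strip l = ""
            · simp [pvInnerB, pvStepA, pvFindA_eq_headerB, h, h3, e2, ih]
            · simp [pvInnerB, pvStepA, pvFindA_eq_headerB, h, h1, h2, h3, ih]

-- ===== VERDICT (by name: the statement is the Claim_ definition above) =====
theorem convert_github_admonitions_spec : Claim_equal_convert_github_admonitions := by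
  intro text _
  unfold Spec_convert_github_admonitions convert_github_admonitions convert_github_admonitions_alt
  have := pvMain ((PySem.Str.split? text "\n").getD []) [] false
  simp only [List.nil_append] at this
  exact congrArg (PySem.Str.join "\n") this
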